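-- pv_equiv track=rewrite | github.com/vishwa2001911/University_test | LabTest03_Q1.py | Speed
-- ===== SOURCE A (Python) =====
-- def Speed(speed):
--
--     count = 0
--     if speed <= 70:
--         return "ok"
--     else:
--         nowSpeed = speed
--
--         while nowSpeed > 70:
--             count += 1
--             nowSpeed -= 5
--             if count > 12:
--                 return "License suspended"
--                 break
--         return f"Count : {count}"
-- ===== SOURCE B (Python) =====
-- def Speed(speed):
--     if speed <= 70:
--         return "ok"
--     if speed > 130:
--         return "License suspended"
--     return f"Count : {(speed - 66) // 5}"
-- ===== Notes on version B (the rewrite author's own statement) =====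
-- stated objective: simpler
-- what changed: Replaces the subtract-5 counting loop with a closed-form ceiling division and a direct suspension threshold comparison; no loop at all.
import Mathlib
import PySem

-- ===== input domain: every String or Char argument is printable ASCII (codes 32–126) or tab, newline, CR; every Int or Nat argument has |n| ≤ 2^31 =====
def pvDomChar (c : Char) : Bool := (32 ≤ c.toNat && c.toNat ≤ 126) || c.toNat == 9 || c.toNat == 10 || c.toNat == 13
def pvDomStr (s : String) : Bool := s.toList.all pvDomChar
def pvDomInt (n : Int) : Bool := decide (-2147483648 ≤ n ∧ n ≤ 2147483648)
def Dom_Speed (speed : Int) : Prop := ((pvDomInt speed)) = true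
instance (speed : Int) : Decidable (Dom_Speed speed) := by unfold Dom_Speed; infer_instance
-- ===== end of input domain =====

-- B replaces A's subtract-5 counting loop by a closed-form ceiling division and a direct suspension threshold comparison (simpler, no loop).


-- ===== PORT A =====
-- the while loop of A: state is (nowSpeed, count); decreases on nowSpeed - 70
def SpeedLoop (nowSpeed : Int) (count : Int) : String :=
  if h : nowSpeed > 70 then
    let count' := count + 1
    let nowSpeed' := nowSpeed - 5
    if count' > 12 then "License suspended"
    else SpeedLoop nowSpeed' count'
  else "Count : " ++ PySem.Int.toStr count
termination_by (nowSpeed - 70).toNat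
decreasing_by omega

def Speed (speed : Int) : String :=
  if speed ≤ 70 then "ok"
  else SpeedLoop speed 0

-- ===== PORT B =====
def Speed_alt (speed : Int) : String :=
  if speed ≤ 70 then "ok"
  else if speed > 130 then "License suspended"
  else "Count : " ++ PySem.Int.toStr (PySem.Int.floordiv (speed - 66) 5)

-- ===== PRECONDITION & SPEC =====
def Spec_Speed (speed : Int) (out : String) : Prop := out = Speed_alt speed
instance (speed : Int) (out : String) : Decidable (Spec_Speed speed out) := by unfold Spec_Speed; infer_instance

-- ===== CLAIM (what is proved, stated in full; the proofs are below) =====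
def Claim_equal_Speed : Prop := ∀ (speed : Int), Dom_Speed speed → Spec_Speed speed (Speed speed)

-- ===== LEMMAS AND PROOFS =====

-- loop characterisation: for count ≥ 0, the loop either suspends (when the total would exceed 12)
-- or returns the starting count plus the closed-form number of 5-steps needed to reach ≤ 70.
theorem SpeedLoop_spec (nowSpeed count : Int) (hc : 0 ≤ count) :
    SpeedLoop nowSpeed count =
      if nowSpeed ≤ 70 then "Count : " ++ PySem.Int.toStr count
      else if count + PySem.Int.floordiv (nowSpeed - 66) 5 > 12 then "License suspended"
      else "Count : " ++ PySem.Int.toStr (count + PySem.Int.floordiv (nowSpeed - 66) 5) := by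
  by_cases h : nowSpeed > 70
  case neg => rw [SpeedLoop, dif_neg h, if_pos (by omega)]
  · rw [SpeedLoop]
    simp only [h, dif_pos]
    have h70' : ¬ nowSpeed ≤ 70 := by omega
    have hstep : PySem.Int.floordiv (nowSpeed - 66) 5 =
        PySem.Int.floordiv (nowSpeed - 5 - 66) 5 + 1 := by
      rw [PySem.Int.floordiv_eq_ediv_of_pos (by omega), PySem.Int.floordiv_eq_ediv_of_pos (by omega)]
      omega
    have ih := SpeedLoop_spec (nowSpeed - 5) (count + 1) (by omega)
    by_cases hcap : count + 1 > 12
    · have hd : PySem.Int.floordiv (nowSpeed - 66) 5 ≥ 1 := by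
        rw [PySem.Int.floordiv_eq_ediv_of_pos (by omega)]; omega
      rw [if_pos hcap, if_neg h70', if_pos (by omega)]
    · rw [if_neg hcap, ih, if_neg h70', hstep,
        show count + (PySem.Int.floordiv (nowSpeed - 5 - 66) 5 + 1)
           = count + 1 + PySem.Int.floordiv (nowSpeed - 5 - 66) 5 from by ring]
      by_cases h70 : nowSpeed - 5 ≤ 70
      · have hd : PySem.Int.floordiv (nowSpeed - 5 - 66) 5 = 0 := by
          rw [PySem.Int.floordiv_eq_ediv_of_pos (by omega)]; omega
        rw [if_pos h70, hd, if_neg (by omega), add_zero]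
      · rw [if_neg h70]
termination_by (nowSpeed - 70).toNat
decreasing_by omega

-- ===== VERDICT (by name: the statement is the Claim_ definition above) =====
theorem Speed_spec : Claim_equal_Speed := by
  intro speed _
  unfold Spec_Speed Speed Speed_alt
  by_cases h : speed ≤ 70
  · simp [h]
  · rw [if_neg h, if_neg h, SpeedLoop_spec speed 0 le_rfl, if_neg h]
    have hdpos : 0 < (5:Int) := by omega
    by_cases h130 : speed > 130
    · have : PySem.Int.floordiv (speed - 66) 5 > 12 := by
        rw [PySem.Int.floordiv_eq_ediv_of_pos hdpos]; omega
      rw [if_pos (by omega), if_pos h130]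
    · have : ¬ (0 + PySem.Int.floordiv (speed - 66) 5 > 12) := by
        rw [PySem.Int.floordiv_eq_ediv_of_pos hdpos]; omega
      rw [if_neg this, if_neg h130, zero_add]
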